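-- pv_equiv track=rewrite | github.com/taogoddd/AgentLab | src/agentlab/agents/augmented_agent/augmented_agent.py | embed_experience
-- ===== SOURCE A (Python) =====
-- def embed_experience(experience):
--     embedded_experience = []
--     # deduplicate the experience
--     experience = list({exp['sub_goal']:exp for exp in experience
--                         }.values())
--     prefix = "Represent the task goal for retrieval: "
--     for exp in experience:
--         embedded_experience.append([prefix, exp['sub_goal']])
--     return embedded_experience
-- ===== SOURCE B (Python) =====
-- def embed_experience(experience):
--     prefix = "Represent the task goal for retrieval: "
--     seen = set()
--     result = []
--     for exp in experience:
--         sg = exp['sub_goal']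
--         if sg not in seen:
--             seen.add(sg)
--             result.append([prefix, sg])
--     return result
-- ===== Notes on version B (the rewrite author's own statement) =====
-- stated objective: simpler
-- what changed: Fuses A's two phases (a dict comprehension that dedups full experience dicts by sub_goal, then a second loop over the dict's values) into one pass with a seen-set that appends the formatted pair at first occurrence, never materializing the intermediate dict.
import Mathlib
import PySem

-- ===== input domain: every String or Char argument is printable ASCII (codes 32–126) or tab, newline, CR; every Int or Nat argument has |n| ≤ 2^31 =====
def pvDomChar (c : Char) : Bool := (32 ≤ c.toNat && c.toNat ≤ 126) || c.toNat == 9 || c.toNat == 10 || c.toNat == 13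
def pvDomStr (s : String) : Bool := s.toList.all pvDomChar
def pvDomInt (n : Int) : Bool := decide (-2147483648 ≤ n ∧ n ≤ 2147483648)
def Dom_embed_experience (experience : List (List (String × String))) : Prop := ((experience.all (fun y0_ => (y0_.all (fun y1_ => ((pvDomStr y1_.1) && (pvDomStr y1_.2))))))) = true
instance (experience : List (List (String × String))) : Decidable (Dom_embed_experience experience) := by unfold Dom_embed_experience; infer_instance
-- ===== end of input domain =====

-- B fuses A's two phases (dict dedup then formatting loop) into one seen-set pass; objective: simpler.

-- shared helper: exp['sub_goal'] on the Python dict exp (modelled as an association list)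
def getSub (exp : List (String × String)) : Option String :=
  (PySem.Dict.ofList exp).get? "sub_goal"

-- ===== PORT A =====
def embed_experience (experience : List (List (String × String))) : List (List String) :=
  -- experience = list({exp['sub_goal']: exp for exp in experience}.values())
  let dedup : PySem.Dict String (List (String × String)) :=
    experience.foldl (fun d exp =>
      match getSub exp with
      | some sg => d.insert sg exp
      | none => d   -- KeyError in Python; excluded by Pre_
      ) PySem.Dict.empty
  -- for exp in experience: embedded_experience.append([prefix, exp['sub_goal']])
  dedup.values.foldl (fun acc exp =>
    acc ++ [["Represent the task goal for retrieval: ", (getSub exp).getD ""]]) []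

-- ===== PORT B =====
def embed_experience_alt (experience : List (List (String × String))) : List (List String) :=
  (experience.foldl (fun (p : PySem.Set String × List (List String)) exp =>
      match getSub exp with
      | some sg =>
          if PySem.Set.contains p.1 sg then p
          else (PySem.Set.add p.1 sg, p.2 ++ [["Represent the task goal for retrieval: ", sg]])
      | none => p   -- KeyError in Python; excluded by Pre_
      ) (PySem.Set.empty, [])).2

-- ===== PRECONDITION & SPEC =====
-- Pre_ excludes exactly the inputs where some experience dict lacks the key "sub_goal",
-- on which the Python A raises KeyError.
def Pre_embed_experience (experience : List (List (String × String))) : Prop :=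
  ∀ exp ∈ experience, ((PySem.Dict.ofList exp).get? "sub_goal").isSome = true
instance (experience : List (List (String × String))) : Decidable (Pre_embed_experience experience) := by unfold Pre_embed_experience; infer_instance
def pvWitness_embed_experience : (List (List (String × String))) :=
  [[("sub_goal", "open the menu")], [("sub_goal", "open the menu"), ("note", "x")], [("sub_goal", "click save")]]
def Spec_embed_experience (experience : List (List (String × String))) (out : List (List String)) : Prop := out = embed_experience_alt experience
instance (experience : List (List (String × String))) (out : List (List String)) : Decidable (Spec_embed_experience experience out) := by unfold Spec_embed_experience; infer_instance

-- ===== CLAIM (what is proved, stated in full; the proofs are below) =====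
def Claim_equal_embed_experience : Prop := ∀ (experience : List (List (String × String))), Dom_embed_experience experience → Pre_embed_experience experience → Spec_embed_experience experience (embed_experience experience)

-- ===== LEMMAS AND PROOFS =====

def fRow (exp : List (String × String)) : List String :=
  ["Represent the task goal for retrieval: ", (getSub exp).getD ""]

lemma foldl_append_rows (exps : List (List (String × String))) (acc : List (List String)) :
    exps.foldl (fun acc exp =>
      acc ++ [["Represent the task goal for retrieval: ", (getSub exp).getD ""]]) acc
      = acc ++ exps.map fRow := by
  induction exps generalizing acc with
  | nil => simp
  | cons e t ih => simp [List.foldl_cons, ih, fRow]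

-- the main invariant: A's dict fold followed by formatting agrees with B's fused fold
lemma main_inv (l : List (List (String × String)))
    (d : PySem.Dict String (List (String × String))) (s : PySem.Set String)
    (out : List (List String))
    (hc : ∀ k, d.contains k = true ↔ k ∈ s)
    (hit : ∀ p ∈ d.items, getSub p.2 = some p.1)
    (hnd : d.keys.Nodup)
    (hout : out = d.values.map fRow)
    (hpre : ∀ exp ∈ l, ((PySem.Dict.ofList exp).get? "sub_goal").isSome = true) :
    ((l.foldl (fun d exp =>
        match getSub exp with
        | some sg => d.insert sg exp
        | none => d) d).values.map fRow)
      = (l.foldl (fun (p : PySem.Set String × List (List String)) exp =>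
          match getSub exp with
          | some sg =>
              if PySem.Set.contains p.1 sg then p
              else (PySem.Set.add p.1 sg, p.2 ++ [["Represent the task goal for retrieval: ", sg]])
          | none => p) (s, out)).2 := by
  induction l generalizing d s out with
  | nil => simpa using hout.symm
  | cons exp t ih =>
    have hsome : ((PySem.Dict.ofList exp).get? "sub_goal").isSome = true :=
      hpre exp (List.mem_cons_self ..)
    obtain ⟨sg, hsg⟩ := Option.isSome_iff_exists.mp hsome
    have hget : getSub exp = some sg := hsg
    simp only [List.foldl_cons, hget]
    by_cases hmem : sg ∈ s
    · -- duplicate sub_goal: A overwrites in place (same projection), B skips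
      have hcont : PySem.Set.contains s sg = true := (PySem.Set.contains_iff s sg).mpr hmem
      have hdcont : d.contains sg = true := (hc sg).mpr hmem
      rw [if_pos hcont]
      apply ih
      · intro k
        rw [PySem.Dict.contains_insert]
        constructor
        · intro h
          rcases Bool.or_eq_true_iff.mp h with h | h
          · exact (eq_of_beq h) ▸ hmem
          · exact (hc k).mp h
        · intro h; exact Bool.or_eq_true_iff.mpr (Or.inr ((hc k).mpr h))
      · intro p hp
        rw [PySem.Dict.items_insert_of_contains _ _ hdcont] at hp
        obtain ⟨q, hq, hpq⟩ := List.mem_map.mp hp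
        by_cases hq1 : q.1 == sg
        · simp only [hq1, if_pos] at hpq
          subst hpq; simpa using hget
        · simp only [hq1, Bool.false_eq_true, if_false] at hpq
          subst hpq; exact hit q hq
      · exact PySem.Dict.nodup_keys_insert _ _ _ hnd
      · -- values.map fRow unchanged by the overwrite
        rw [hout]
        unfold PySem.Dict.values
        rw [PySem.Dict.items_insert_of_contains _ _ hdcont]
        rw [List.map_map, List.map_map, List.map_map]
        apply List.map_congr_left
        intro p hp
        by_cases hp1 : p.1 == sg
        · have : getSub p.2 = some p.1 := hit p hp
          simp [Function.comp, fRow, this, hget, eq_of_beq hp1]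
        · simp [Function.comp, hp1]
      · intro e he; exact hpre e (List.mem_cons_of_mem _ he)
    · -- fresh sub_goal: A appends a new entry, B records it
      have hcont : PySem.Set.contains s sg = false := by
        by_contra h
        exact hmem ((PySem.Set.contains_iff s sg).mp (by simpa using h))
      have hdcont : d.contains sg = false := by
        by_contra h
        exact hmem ((hc sg).mp (by simpa using h))
      rw [if_neg (fun h => hmem ((PySem.Set.contains_iff s sg).mp h))]
      show _ = (t.foldl _ (PySem.Set.add s sg, _)).2
      apply ih
      · intro k
        rw [PySem.Dict.contains_insert, PySem.Set.mem_add]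
        constructor
        · intro h
          rcases Bool.or_eq_true_iff.mp h with h | h
          · exact Or.inr (eq_of_beq h)
          · exact Or.inl ((hc k).mp h)
        · rintro (h | h)
          · exact Bool.or_eq_true_iff.mpr (Or.inr ((hc k).mpr h))
          · exact Bool.or_eq_true_iff.mpr (Or.inl (by simp [h]))
      · intro p hp
        rw [PySem.Dict.items_insert_of_not_contains _ _ hdcont] at hp
        rcases List.mem_append.mp hp with h | h
        · exact hit p h
        · simp only [List.mem_singleton] at h; subst h; simpa using hget
      · exact PySem.Dict.nodup_keys_insert _ _ _ hnd
      · rw [hout]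
        unfold PySem.Dict.values
        rw [PySem.Dict.items_insert_of_not_contains _ _ hdcont]
        simp [fRow, hget]
      · intro e he; exact hpre e (List.mem_cons_of_mem _ he)

-- ===== VERDICT (by name: the statement is the Claim_ definition above) =====
theorem embed_experience_spec : Claim_equal_embed_experience := by
  intro experience _hdom hpre
  unfold Spec_embed_experience embed_experience embed_experience_alt
  rw [foldl_append_rows]
  simp only [List.nil_append]
  exact main_inv experience PySem.Dict.empty PySem.Set.empty []
    (by intro k; simp [PySem.Dict.contains_empty, PySem.Set.empty])
    (by intro p hp; simp [PySem.Dict.empty] at hp)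
    (PySem.Dict.nodup_keys_empty)
    (by simp [PySem.Dict.values, PySem.Dict.empty])
    hpre
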